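-- pv_equiv track=rewrite | github.com/agarwalayush-2000/Python_Workout | Ex-7.py | ubbi_dubbi_capitalize
-- ===== SOURCE A (Python) =====
-- def ubbi_dubbi_capitalize(word):
--
--     ubbi_dubbi_word = ''
--     capital = False
--
--     if word[0] in 'QWERTYUIOPLKJHGFDSAZXCVBNM':
--         capital = True
--
--     word = word.lower()
--     for i in word:
--         if i in 'aeiou':
--             ubbi_dubbi_word += f'ub{i}'
--         else:
--             ubbi_dubbi_word += i
--
--     if not capital:
--         return ubbi_dubbi_word
--
--     return f'{ubbi_dubbi_word[0].upper()}{ubbi_dubbi_word[1:]}'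
-- ===== SOURCE B (Python) =====
-- def ubbi_dubbi_capitalize(word):
--     capital = word[0].isupper()
--     body = word.lower()
--     # staged whole-string passes; 'u' first so the 'ub' tags inserted later are never reprocessed
--     for v in 'uaeio':
--         body = body.replace(v, 'ub' + v)
--     if capital:
--         return body[0].upper() + body[1:]
--     return body
-- ===== Notes on version B (the rewrite author's own statement) =====
-- stated objective: faster
-- what changed: Replaces A's single per-character accumulator loop with five staged whole-string str.replace passes, one per vowel with 'u' replaced first so the inserted 'ub' tags are never reprocessed; the capital flag becomes word[0].isupper().
import Mathlib
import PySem

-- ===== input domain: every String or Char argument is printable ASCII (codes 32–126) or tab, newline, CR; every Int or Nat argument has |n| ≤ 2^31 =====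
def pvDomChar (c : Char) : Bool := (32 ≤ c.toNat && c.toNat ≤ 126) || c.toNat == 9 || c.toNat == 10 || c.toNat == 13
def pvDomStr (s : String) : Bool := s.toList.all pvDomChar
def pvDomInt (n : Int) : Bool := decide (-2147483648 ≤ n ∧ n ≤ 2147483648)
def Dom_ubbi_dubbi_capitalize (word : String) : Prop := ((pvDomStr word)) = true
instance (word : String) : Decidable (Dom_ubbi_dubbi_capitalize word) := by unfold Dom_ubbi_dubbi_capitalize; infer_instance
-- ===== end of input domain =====

-- B replaces A's per-character accumulator loop with five staged whole-string str.replace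
-- passes (one per vowel, 'u' first so the inserted 'ub' tags are never reprocessed) — alternative strategy.

-- ===== PORT A =====
-- 'QWERTYUIOPLKJHGFDSAZXCVBNM' and 'aeiou' as explicit char lists (exact: ASCII string literals)
def pvUppers : List Char :=
  ['Q','W','E','R','T','Y','U','I','O','P','L','K','J','H','G','F','D','S','A','Z','X','C','V','B','N','M']
def pvVowels : List Char := ['a','e','i','o','u']

def ubbi_dubbi_capitalize (word : String) : String :=
  match PySem.Str.pyGet? word 0 with
  | none => ""        -- word[0] raises IndexError: excluded by Pre_
  | some c0 =>
    let capital := pvUppers.contains c0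
    let w := PySem.Chars.lower word.toList            -- word = word.lower()
    let body := w.foldl (fun acc i =>
        if pvVowels.contains i then acc ++ ['u','b',i] else acc ++ [i]) ([] : List Char)
    if !capital then String.ofList body
    else
      match body with
      | [] => ""      -- ubbi_dubbi_word[0] would raise IndexError: unreachable (word nonempty)
      | b :: bs => String.ofList (PySem.Chars.upperChar b :: bs)   -- f'{..[0].upper()}{..[1:]}'

-- ===== PORT B =====
def ubbi_dubbi_capitalize_alt (word : String) : String :=
  match PySem.Str.pyGet? word 0 with
  | none => ""        -- word[0] raises IndexError: excluded by Pre_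
  | some c0 =>
    let capital := PySem.Chars.isupper c0             -- word[0].isupper(): exact on Dom (ASCII)
    -- for v in 'uaeio': body = body.replace(v, 'ub' + v)   — staged whole-string passes
    let body := ['u','a','e','i','o'].foldl
        (fun b v => PySem.Chars.replace b [v] ['u','b',v]) (PySem.Chars.lower word.toList)
    if capital then
      match body with
      | [] => ""      -- body[0]: unreachable here (body nonempty when word nonempty)
      | b :: bs => String.ofList (PySem.Chars.upperChar b :: bs)   -- body[0].upper() + body[1:]
    else String.ofList body

-- ===== PRECONDITION & SPEC =====
-- Pre_ excludes only the empty string, where both A and B raise IndexError at word[0].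
def Pre_ubbi_dubbi_capitalize (word : String) : Prop := word ≠ ""
instance (word : String) : Decidable (Pre_ubbi_dubbi_capitalize word) := by
  unfold Pre_ubbi_dubbi_capitalize; infer_instance
def pvWitness_ubbi_dubbi_capitalize : String := "Hello"

def Spec_ubbi_dubbi_capitalize (word : String) (out : String) : Prop :=
  out = ubbi_dubbi_capitalize_alt word
instance (word : String) (out : String) : Decidable (Spec_ubbi_dubbi_capitalize word out) := by
  unfold Spec_ubbi_dubbi_capitalize; infer_instance

-- ===== CLAIM (what is proved, stated in full; the proofs are below) =====
def Claim_equal_ubbi_dubbi_capitalize : Prop :=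
  ∀ (word : String), Dom_ubbi_dubbi_capitalize word → Pre_ubbi_dubbi_capitalize word →
    Spec_ubbi_dubbi_capitalize word (ubbi_dubbi_capitalize word)

-- ===== LEMMAS AND PROOFS =====

-- the per-character effect of one replace pass body.replace(v, 'ub'+v)
def pvF (v : Char) (c : Char) : List Char := if c = v then ['u','b',v] else [c]

-- membership in A's scrambled uppercase string equals the ASCII-uppercase test B uses
theorem pv_upper_mem (c : Char) : (pvUppers.contains c) = PySem.Chars.isupper c := by
  rw [Bool.eq_iff_iff]
  simp [pvUppers, PySem.Chars.isupper, Char.le_def]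
  constructor
  · rintro (rfl|rfl|rfl|rfl|rfl|rfl|rfl|rfl|rfl|rfl|rfl|rfl|rfl|rfl|rfl|rfl|rfl|rfl|rfl|rfl|rfl|rfl|rfl|rfl|rfl|rfl) <;> decide
  · intro h
    have h1 : 65 ≤ c.toNat := h.1
    have h2 : 90 ≥ c.toNat := h.2
    interval_cases hn : c.toNat <;> (rw [← Char.ofNat_toNat c, hn]; decide)

-- one replace pass with a single-char pattern is the flatMap of its per-character effect
theorem pv_go_single (v : Char) (r : List Char) :
    ∀ (l acc : List Char),
      PySem.Chars.replace.go [v] r l.length l acc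
        = acc.reverse ++ l.flatMap (fun c => if c = v then r else [c]) := by
  intro l
  induction l with
  | nil => intro acc; simp [PySem.Chars.replace.go]
  | cons c t ih =>
    intro acc
    rw [List.length_cons]
    rw [PySem.Chars.replace.go]
    by_cases h : v = c
    · subst h
      simp only [List.isPrefixOf, BEq.rfl, Bool.true_and, if_true,
        List.length_cons, List.drop_succ_cons, List.length_nil, List.drop_zero]
      rw [ih]
      simp [List.flatMap_cons]
    · have hb : ([v].isPrefixOf (c :: t)) = false := by
        simp [List.isPrefixOf, h]
      rw [hb]
      simp only [Bool.false_eq_true, if_false]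
      rw [ih]
      simp [List.flatMap_cons, Ne.symm h]

theorem pv_replace_single (v : Char) (l : List Char) :
    PySem.Chars.replace l [v] ['u','b',v] = l.flatMap (pvF v) := by
  have : PySem.Chars.replace l [v] ['u','b',v]
      = PySem.Chars.replace.go [v] ['u','b',v] l.length l [] := by
    simp [PySem.Chars.replace]
  rw [this, pv_go_single]
  rfl

-- composing the five passes ('u' first) on one character gives the single-pass effect
theorem pv_chain (c : Char) :
    (pvF 'u' c).flatMap (fun x => (pvF 'a' x).flatMap (fun y =>
        (pvF 'e' y).flatMap (fun z => (pvF 'i' z).flatMap (pvF 'o'))))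
      = if pvVowels.contains c then ['u','b',c] else [c] := by
  by_cases hu : c = 'u'; · subst hu; decide
  by_cases ha : c = 'a'; · subst ha; decide
  by_cases he : c = 'e'; · subst he; decide
  by_cases hi : c = 'i'; · subst hi; decide
  by_cases ho : c = 'o'; · subst ho; decide
  simp [pvF, pvVowels, hu, ha, he, hi, ho]

-- B's five staged replaces compute the same body as one flatMap pass
theorem pv_body_alt (L : List Char) :
    ['u','a','e','i','o'].foldl
        (fun b v => PySem.Chars.replace b [v] ['u','b',v]) L
      = L.flatMap (fun c => if pvVowels.contains c then ['u','b',c] else [c]) := by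
  simp only [List.foldl_cons, List.foldl_nil]
  rw [pv_replace_single, pv_replace_single, pv_replace_single, pv_replace_single,
    pv_replace_single, List.flatMap_assoc, List.flatMap_assoc, List.flatMap_assoc,
    List.flatMap_assoc]
  exact List.flatMap_congr (fun c _ => pv_chain c)

-- A's accumulator loop computes that same body
theorem pv_body_eq (l : List Char) :
    l.foldl (fun acc i =>
        if pvVowels.contains i then acc ++ ['u','b',i] else acc ++ [i]) ([] : List Char) =
      l.flatMap (fun c => if pvVowels.contains c then ['u','b',c] else [c]) := by
  have hf : (fun (acc : List Char) i =>
      if pvVowels.contains i then acc ++ ['u','b',i] else acc ++ [i]) =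
      (fun acc i => acc ++ (if pvVowels.contains i then ['u','b',i] else [i])) := by
    funext acc i; split <;> rfl
  rw [hf, PySem.List.foldl_append_eq_flatMap]
  rfl

-- ===== VERDICT (by name: the statement is the Claim_ definition above) =====
theorem ubbi_dubbi_capitalize_spec : Claim_equal_ubbi_dubbi_capitalize := by
  intro word _hdom hpre
  unfold Spec_ubbi_dubbi_capitalize ubbi_dubbi_capitalize ubbi_dubbi_capitalize_alt
  have hne : word.toList ≠ [] := by
    intro h
    exact hpre (by rwa [← String.toList_eq_nil_iff])
  rcases hl : word.toList with _ | ⟨c, cs⟩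
  · exact absurd hl hne
  · have hget : PySem.Str.pyGet? word 0 = some c := by
      simp [PySem.Str.pyGet?, hl, PySem.Chars.pyGet?]
    rw [hget]
    simp only [pv_body_eq, pv_body_alt, pv_upper_mem]
    cases h : PySem.Chars.isupper c <;> simp
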